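-- pv_equiv track=rewrite | github.com/Ploenypp/bioinformatics-uni-project | TME.py | searchGivenMotif
-- ===== SOURCE A (Python) =====
-- def searchGivenMotif(motifsTrouve, motifSpecifique, decroissant = True):
--     """
--     Cherche un motif specifique dans un dictionnaire de motifs trouvés
--     entrée motifsTrouve : dictionnaire de motifs, clé = motif, valeur = fréquence d'observation
--     entrée motifSpecifique: un motif specifique à chercher
--     entrée decroissant : bool, si True, le dictionnaire est trié par ordre décroissant de valeur
--     sortie fréquence : la fréquence du motif
--     sortie ranking : dans quelle position le motif a été trouvé
--     >>>searchGivenMotif(test_motifs, "TAT")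
--     (2, 2)
--     """
--
--     ranking = 1
--     frequence = 0
--
--     ordered = sorted(motifsTrouve.items(),key=lambda item : item[1])
--     if decroissant : ordered = reversed(ordered)
--     ordered = dict(ordered)
--
--     for (key,freq) in ordered.items() :
--         if key == motifSpecifique :
--             frequence = freq
--             break
--         ranking += 1
--
--     return ranking, frequence
-- ===== SOURCE B (Python) =====
-- def searchGivenMotif(motifsTrouve, motifSpecifique, decroissant = True):
--     # Single pass: find the motif, then count the entries that the stable
--     # value-sort (reversed when decroissant) places before it; no sorting.
--     items = list(motifsTrouve.items())
--     found = None
--     for i, (k, v) in enumerate(items):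
--         if k == motifSpecifique:
--             found = (i, v)
--             break
--     if found is None:
--         return len(items) + 1, 0
--     it, vt = found
--     ranking = 1
--     for i, (k, v) in enumerate(items):
--         if decroissant:
--             if v > vt or (v == vt and i > it):
--                 ranking += 1
--         else:
--             if v < vt or (v == vt and i < it):
--                 ranking += 1
--     return ranking, vt
-- ===== Notes on version B (the rewrite author's own statement) =====
-- stated objective: faster
-- what changed: B drops A's sort-and-rebuild-a-dict entirely: it finds the motif in one scan and then counts, in a single linear pass, the entries that the stable value sort (reversed when decroissant) would place before it.
import Mathlib
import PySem

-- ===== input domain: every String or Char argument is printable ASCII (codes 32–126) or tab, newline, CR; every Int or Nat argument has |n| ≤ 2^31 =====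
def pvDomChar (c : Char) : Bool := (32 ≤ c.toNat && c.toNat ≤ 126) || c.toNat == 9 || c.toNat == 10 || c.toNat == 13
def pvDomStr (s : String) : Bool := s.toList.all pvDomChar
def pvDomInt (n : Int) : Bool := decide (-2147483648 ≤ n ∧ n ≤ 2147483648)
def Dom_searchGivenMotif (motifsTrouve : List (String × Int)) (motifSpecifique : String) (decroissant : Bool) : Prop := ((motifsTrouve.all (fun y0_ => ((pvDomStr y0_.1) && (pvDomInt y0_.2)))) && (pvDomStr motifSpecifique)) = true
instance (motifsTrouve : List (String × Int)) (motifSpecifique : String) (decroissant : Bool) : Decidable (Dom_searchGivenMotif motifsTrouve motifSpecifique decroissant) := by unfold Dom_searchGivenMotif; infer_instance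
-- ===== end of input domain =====

-- B replaces A's sort-then-scan by a linear count of the entries the stable value
-- sort (reversed when decroissant) places before the motif (objective: faster).


-- ===== PORT A =====
-- the 'for (key,freq) in ordered.items()' loop with its break, carrying ranking and frequence
def pvALoop (items : List (String × Int)) (motifSpecifique : String) (ranking frequence : Int) : Int × Int :=
  match items with
  | [] => (ranking, frequence)
  | (k, v) :: rest =>
      if k == motifSpecifique then (ranking, v)
      else pvALoop rest motifSpecifique (ranking + 1) frequence

def searchGivenMotif (motifsTrouve : List (String × Int)) (motifSpecifique : String) (decroissant : Bool) : Int × Int :=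
  let ordered := PySem.List.sorted motifsTrouve (fun item => item.2)
  let ordered' := if decroissant then ordered.reverse else ordered
  let d := PySem.Dict.ofList ordered'
  pvALoop d.items motifSpecifique 1 0

-- ===== PORT B =====
-- first loop of Source B: first (i, (k, v)) with k == motifSpecifique
def pvFindMotif (e : List (Int × (String × Int))) (motifSpecifique : String) : Option (Int × Int) :=
  match e with
  | [] => none
  | (i, kv) :: rest =>
      if kv.1 == motifSpecifique then some (i, kv.2)
      else pvFindMotif rest motifSpecifique

def searchGivenMotif_alt (motifsTrouve : List (String × Int)) (motifSpecifique : String) (decroissant : Bool) : Int × Int :=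
  match pvFindMotif (PySem.List.enumerate motifsTrouve) motifSpecifique with
  | none => ((motifsTrouve.length : Int) + 1, 0)
  | some (it, vt) =>
      let ranking := (PySem.List.enumerate motifsTrouve).foldl (fun r p =>
        if decroissant then
          (if p.2.2 > vt ∨ (p.2.2 = vt ∧ p.1 > it) then r + 1 else r)
        else
          (if p.2.2 < vt ∨ (p.2.2 = vt ∧ p.1 < it) then r + 1 else r)) 1
      (ranking, vt)

-- ===== PRECONDITION & SPEC =====
-- Pre_ excludes association lists with duplicate keys: A's Python argument is a dict, whose
-- items always have pairwise-distinct keys, so such lists never reach the Python function.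
def Pre_searchGivenMotif (motifsTrouve : List (String × Int)) (motifSpecifique : String) (decroissant : Bool) : Prop :=
  (motifsTrouve.map Prod.fst).Nodup
instance (motifsTrouve : List (String × Int)) (motifSpecifique : String) (decroissant : Bool) : Decidable (Pre_searchGivenMotif motifsTrouve motifSpecifique decroissant) := by unfold Pre_searchGivenMotif; infer_instance

def pvWitness_searchGivenMotif : (List (String × Int)) × String × Bool :=
  ([("TAT", 2), ("GCG", 3), ("AAA", 1)], "TAT", true)

def Spec_searchGivenMotif (motifsTrouve : List (String × Int)) (motifSpecifique : String) (decroissant : Bool) (out : Int × Int) : Prop := out = searchGivenMotif_alt motifsTrouve motifSpecifique decroissant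
instance (motifsTrouve : List (String × Int)) (motifSpecifique : String) (decroissant : Bool) (out : Int × Int) : Decidable (Spec_searchGivenMotif motifsTrouve motifSpecifique decroissant out) := by unfold Spec_searchGivenMotif; infer_instance

-- ===== CLAIM (what is proved, stated in full; the proofs are below) =====
def Claim_equal_searchGivenMotif : Prop := ∀ (motifsTrouve : List (String × Int)) (motifSpecifique : String) (decroissant : Bool), Dom_searchGivenMotif motifsTrouve motifSpecifique decroissant → Pre_searchGivenMotif motifsTrouve motifSpecifique decroissant → Spec_searchGivenMotif motifsTrouve motifSpecifique decroissant (searchGivenMotif motifsTrouve motifSpecifique decroissant)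

-- ===== LEMMAS AND PROOFS =====

-- the decorated key: value first, original position as tie-break
-- (lexicographic, encoded into one integer; exact while all positions lie in [0, C))
def pvW (C : Int) (p : Int × (String × Int)) : Int := p.2.2 * C + p.1

theorem pvLex (a b i j C : Int) (hi : 0 ≤ i) (hiC : i < C) (hj : 0 ≤ j) (hjC : j < C) :
    a * C + i < b * C + j ↔ a < b ∨ (a = b ∧ i < j) := by
  constructor
  · intro h
    rcases lt_trichotomy a b with h' | h' | h'
    · exact Or.inl h'
    · exact Or.inr ⟨h', by nlinarith⟩
    · exfalso; nlinarith
  · rintro (h' | ⟨rfl, h'⟩)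
    · nlinarith
    · omega

theorem pvInsertBy_nil {α : Type} (f : α → α → Bool) (x : α) :
    PySem.List.insertBy f x [] = [x] := rfl

theorem pvInsertBy_cons {α : Type} (f : α → α → Bool) (x y : α) (ys : List α) :
    PySem.List.insertBy f x (y :: ys) = if f x y then x :: y :: ys else y :: PySem.List.insertBy f x ys := rfl

-- enumerate basics
theorem pvEnumMapSnd {α : Type} (xs : List α) : ∀ s : Int, (PySem.List.enumerate xs s).map Prod.snd = xs := by
  induction xs with
  | nil => intro s; simp [PySem.List.enumerate_nil]
  | cons x t ih => intro s; simp [PySem.List.enumerate_cons, ih]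

theorem pvEnumMem {α : Type} (xs : List α) :
    ∀ (s : Int) (q : Int × α), q ∈ PySem.List.enumerate xs s → s ≤ q.1 ∧ q.1 < s + xs.length := by
  induction xs with
  | nil => intro s q hq; simp [PySem.List.enumerate_nil] at hq
  | cons x t ih =>
    intro s q hq
    rw [PySem.List.enumerate_cons, List.mem_cons] at hq
    rcases hq with rfl | hq
    · simp only [List.length_cons]; omega
    · have := ih (s + 1) q hq
      simp at this ⊢
      omega

theorem pvEnumPairwise {α : Type} (xs : List α) :
    ∀ s : Int, (PySem.List.enumerate xs s).Pairwise (fun a b => a.1 < b.1) := by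
  induction xs with
  | nil => intro s; simp [PySem.List.enumerate_nil]
  | cons x t ih =>
    intro s
    rw [PySem.List.enumerate_cons]
    refine List.Pairwise.cons ?_ (ih (s + 1))
    intro q hq
    have := pvEnumMem t (s + 1) q hq
    omega

-- any two elements of enumerate xs s with equal index are equal
theorem pvEnumIdxUnique {α : Type} (xs : List α) (s : Int) (p q : Int × α)
    (hp : p ∈ PySem.List.enumerate xs s) (hq : q ∈ PySem.List.enumerate xs s)
    (h : p.1 = q.1) : p = q := by
  by_contra hne
  have hpw : (PySem.List.enumerate xs s).Pairwise (fun a b => a.1 < b.1 ∨ b.1 < a.1) :=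
    (pvEnumPairwise xs s).imp (fun hlt => Or.inl hlt)
  have := List.Pairwise.forall (R := fun (a b : Int × α) => a.1 < b.1 ∨ b.1 < a.1)
    (fun _ _ hab => hab.symm) hpw hp hq hne
  omega

-- with pairwise-distinct keys, any two entries of the enumeration with the same key are equal
theorem pvEnumKeyUnique (m : List (String × Int)) (hnd : (m.map Prod.fst).Nodup) :
    ∀ (s : Int) (p q : Int × (String × Int)), p ∈ PySem.List.enumerate m s → q ∈ PySem.List.enumerate m s →
      p.2.1 = q.2.1 → p = q := by
  induction m with
  | nil => intro s p q hp; simp [PySem.List.enumerate_nil] at hp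
  | cons x t ih =>
    intro s p q hp hq hkey
    simp only [List.map_cons, List.nodup_cons] at hnd
    rw [PySem.List.enumerate_cons, List.mem_cons] at hp hq
    have hmem : ∀ r : Int × (String × Int), r ∈ PySem.List.enumerate t (s + 1) → r.2.1 ∈ t.map Prod.fst := by
      intro r hr
      have : r.2 ∈ (PySem.List.enumerate t (s + 1)).map Prod.snd := List.mem_map_of_mem hr
      rw [pvEnumMapSnd] at this
      exact List.mem_map_of_mem this
    rcases hp with rfl | hp <;> rcases hq with rfl | hq
    · rfl
    · exact absurd (hkey ▸ hmem q hq) hnd.1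
    · exact absurd (hkey ▸ hmem p hp) hnd.1
    · exact ih hnd.2 (s + 1) p q hp hq hkey

-- A's loop when the motif does not occur
theorem pvALoop_notfound : ∀ (l : List (String × Int)) (s : String) (r f : Int),
    (∀ p ∈ l, p.1 ≠ s) → pvALoop l s r f = (r + l.length, f) := by
  intro l
  induction l with
  | nil => intro s r f _; simp [pvALoop]
  | cons p t ih =>
    intro s r f h
    obtain ⟨k, v⟩ := p
    have hk : k ≠ s := h (k, v) (by simp)
    simp only [pvALoop, beq_iff_eq, if_neg hk]
    rw [ih s (r + 1) f (fun q hq => h q (by simp [hq]))]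
    simp
    omega

-- A's loop on a ww-sorted decorated list, via the count of strict predecessors
theorem pvALoop_count (ww : Int × (String × Int) → Int) :
    ∀ (LE : List (Int × (String × Int))) (s : String) (t : Int × (String × Int)) (r f : Int),
      LE.Pairwise (fun a b => ww a ≤ ww b) →
      (LE.map ww).Nodup →
      t ∈ LE → t.2.1 = s → (∀ e ∈ LE, e.2.1 = s → e = t) →
      pvALoop (LE.map Prod.snd) s r f
        = (r + (LE.countP (fun e => decide (ww e < ww t)) : Int), t.2.2) := by
  intro LE
  induction LE with
  | nil => intro s t r f _ _ ht _ _; simp at ht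
  | cons e rest ih =>
    intro s t r f hpw hnd htmem hts huniq
    rw [List.pairwise_cons] at hpw
    rw [List.map_cons, List.nodup_cons] at hnd
    by_cases hk : e.2.1 = s
    · have he : e = t := huniq e (by simp) hk
      subst he
      have hzero : rest.countP (fun b => decide (ww b < ww e)) = 0 := by
        rw [List.countP_eq_zero]
        intro b hb
        have h1 := hpw.1 b hb
        have h2 : ww b ≠ ww e := fun hEq => hnd.1 (hEq ▸ List.mem_map_of_mem hb)
        simp
        omega
      obtain ⟨i, k, v⟩ := e
      simp only at hk
      subst hk
      simp [pvALoop, hzero]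
    · have htr : t ∈ rest := by
        rcases List.mem_cons.mp htmem with rfl | h
        · exact absurd hts hk
        · exact h
      have hlt : ww e < ww t := by
        have h1 := hpw.1 t htr
        have h2 : ww e ≠ ww t := fun hEq => hnd.1 (hEq ▸ List.mem_map_of_mem htr)
        omega
      obtain ⟨i, k, v⟩ := e
      simp only at hk
      simp only [List.map_cons, pvALoop, beq_iff_eq, if_neg hk]
      rw [ih s t (r + 1) f hpw.2 hnd.2 htr hts (fun b hb hbs => huniq b (by simp [hb]) hbs)]
      rw [List.countP_cons]
      simp only [decide_eq_true_eq]
      rw [if_pos hlt]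
      simp only [Prod.mk.injEq]
      exact ⟨by push_cast; omega, trivial⟩

-- pvFindMotif characterisations
theorem pvFindMotif_none : ∀ (e : List (Int × (String × Int))) (s : String),
    pvFindMotif e s = none ↔ ∀ q ∈ e, q.2.1 ≠ s := by
  intro e s
  induction e with
  | nil => simp [pvFindMotif]
  | cons q t ih =>
    obtain ⟨i, kv⟩ := q
    by_cases h : kv.1 = s
    · simp [pvFindMotif, h]
    · simp [pvFindMotif, h, ih]

theorem pvFindMotif_some_mem : ∀ (e : List (Int × (String × Int))) (s : String) (i v : Int),
    pvFindMotif e s = some (i, v) → (i, (s, v)) ∈ e := by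
  intro e s
  induction e with
  | nil => intro i v h; simp [pvFindMotif] at h
  | cons q t ih =>
    intro i v h
    obtain ⟨j, a, b⟩ := q
    by_cases hk : a = s
    · subst hk
      simp [pvFindMotif] at h
      obtain ⟨rfl, rfl⟩ := h
      simp
    · simp [pvFindMotif, hk] at h
      exact List.mem_cons_of_mem _ (ih i v h)

-- the stable sort of the plain list is the snd-projection of the strict sort of the decorated list
theorem pvInsertMapSnd (C : Int) (x : Int × (String × Int)) (hx0 : 0 ≤ x.1) (hxC : x.1 < C) :
    ∀ acc : List (Int × (String × Int)),
    (∀ p ∈ acc, 0 ≤ p.1 ∧ p.1 < C ∧ p.1 < x.1) →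
    PySem.List.insertBy (fun a b => decide (a.2 < b.2)) x.2 (acc.map Prod.snd)
      = (PySem.List.insertBy (fun p q => decide (pvW C p < pvW C q)) x acc).map Prod.snd := by
  intro acc
  induction acc with
  | nil => intro _; simp [pvInsertBy_nil]
  | cons y ys ih =>
    intro hacc
    have hy := hacc y (by simp)
    have hb : decide (x.2.2 < y.2.2) = decide (pvW C x < pvW C y) := by
      rw [decide_eq_decide]
      rw [pvW, pvW, pvLex _ _ _ _ _ hx0 hxC hy.1 hy.2.1]
      have := hy.2.2
      constructor
      · exact Or.inl
      · rintro (h | ⟨_, h⟩) <;> omega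
    rw [List.map_cons, pvInsertBy_cons, pvInsertBy_cons, hb]
    by_cases hc : pvW C x < pvW C y
    · simp [hc]
    · simp [hc, ih (fun p hp => hacc p (List.mem_cons_of_mem _ hp))]

theorem pvFoldMapSnd (C : Int) :
    ∀ (es acc : List (Int × (String × Int))),
      (∀ q ∈ es, 0 ≤ q.1 ∧ q.1 < C) →
      es.Pairwise (fun a b => a.1 < b.1) →
      (∀ p ∈ acc, 0 ≤ p.1 ∧ p.1 < C ∧ ∀ q ∈ es, p.1 < q.1) →
      (es.map Prod.snd).foldl
          (fun l x => PySem.List.insertBy (fun a b => decide (a.2 < b.2)) x l) (acc.map Prod.snd)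
        = (es.foldl (fun l q => PySem.List.insertBy (fun p q' => decide (pvW C p < pvW C q')) q l) acc).map Prod.snd := by
  intro es
  induction es with
  | nil => intro acc _ _ _; simp
  | cons x rest ih =>
    intro acc hes hord hacc
    rw [List.pairwise_cons] at hord
    have hx := hes x (by simp)
    simp only [List.map_cons, List.foldl_cons]
    rw [pvInsertMapSnd C x hx.1 hx.2 acc (fun p hp => ⟨(hacc p hp).1, (hacc p hp).2.1, (hacc p hp).2.2 x (by simp)⟩)]
    apply ih _ (fun q hq => hes q (List.mem_cons_of_mem _ hq)) hord.2
    intro p hp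
    rcases (PySem.List.mem_insertBy _ x p acc).mp hp with rfl | hpa
    · exact ⟨hx.1, hx.2, hord.1⟩
    · exact ⟨(hacc p hpa).1, (hacc p hpa).2.1, fun q hq => (hacc p hpa).2.2 q (List.mem_cons_of_mem _ hq)⟩

-- dict(ordered) keeps a duplicate-free pair list unchanged
theorem pvOfListItems (l : List (String × Int)) (h : (l.map Prod.fst).Nodup) :
    (PySem.Dict.ofList l).items = l := by
  have : PySem.Dict.ofList l = l.foldl (fun d a => d.insert a.1 a.2) PySem.Dict.empty := rfl
  rw [this, PySem.Dict.items_foldl_insert_fresh l Prod.fst Prod.snd PySem.Dict.empty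
      (fun a _ => PySem.Dict.contains_empty a.1) h]
  have he : (PySem.Dict.empty : PySem.Dict String Int).items = [] := rfl
  rw [he]
  simp

-- ===== VERDICT (by name: the statement is the Claim_ definition above) =====
theorem searchGivenMotif_spec : Claim_equal_searchGivenMotif := by
  unfold Claim_equal_searchGivenMotif
  intro m s dec _ hpre
  unfold Pre_searchGivenMotif at hpre
  unfold Spec_searchGivenMotif searchGivenMotif searchGivenMotif_alt
  set C : Int := (m.length : Int) with hC
  set E := PySem.List.enumerate m 0 with hE
  have hbounds : ∀ q ∈ E, 0 ≤ q.1 ∧ q.1 < C := by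
    intro q hq
    have := pvEnumMem m 0 q hq
    omega
  have hmap : E.map Prod.snd = m := pvEnumMapSnd m 0
  set LE := PySem.List.sorted E (pvW C) with hLE
  have hL : PySem.List.sorted m (fun item => item.2) = LE.map Prod.snd := by
    rw [hLE, PySem.List.sorted_eq_foldl_insertBy m (fun item => item.2),
        PySem.List.sorted_eq_foldl_insertBy E (pvW C), ← hmap]
    exact pvFoldMapSnd C E [] hbounds (pvEnumPairwise m 0) (by simp)
  have hperm : LE.Perm E := PySem.List.sorted_perm E (pvW C) false
  have hndE : E.Nodup := by
    refine List.Pairwise.imp ?_ (pvEnumPairwise m 0)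
    intro a b h hab
    rw [hab] at h
    omega
  have hndLE : LE.Nodup := hperm.nodup_iff.mpr hndE
  have hinjE : ∀ p ∈ E, ∀ q ∈ E, pvW C p = pvW C q → p = q := by
    intro p hp q hq hw
    have hbp := hbounds p hp
    have hbq := hbounds q hq
    have h1 : ¬ pvW C p < pvW C q := by omega
    have h2 : ¬ pvW C q < pvW C p := by omega
    rw [pvW, pvW, pvLex _ _ _ _ _ hbp.1 hbp.2 hbq.1 hbq.2] at h1
    rw [pvW, pvW, pvLex _ _ _ _ _ hbq.1 hbq.2 hbp.1 hbp.2] at h2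
    have hidx : p.1 = q.1 := by
      omega
    exact pvEnumIdxUnique m 0 p q hp hq hidx
  have hndLEw : (LE.map (pvW C)).Nodup :=
    List.Nodup.map_on (fun x hx y hy => hinjE x (hperm.mem_iff.mp hx) y (hperm.mem_iff.mp hy)) hndLE
  have hpwLE : LE.Pairwise (fun a b => pvW C a ≤ pvW C b) := PySem.List.sorted_pairwise E (pvW C)
  cases hfind : pvFindMotif E s with
  | none =>
    have hnone := (pvFindMotif_none E s).mp hfind
    have hnotin : ∀ p ∈ (if dec then (LE.map Prod.snd).reverse else LE.map Prod.snd), p.1 ≠ s := by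
      intro p hp
      have hpm : p ∈ LE.map Prod.snd := by
        cases dec <;> simp_all
      have : p ∈ E.map Prod.snd := by
        rcases List.mem_map.mp hpm with ⟨q, hq, rfl⟩
        exact List.mem_map_of_mem (hperm.mem_iff.mp hq)
      rcases List.mem_map.mp this with ⟨q, hq, rfl⟩
      exact hnone q hq
    have hkeysnd : ((if dec then (LE.map Prod.snd).reverse else LE.map Prod.snd).map Prod.fst).Nodup := by
      have hbase : ((LE.map Prod.snd).map Prod.fst).Nodup := by
        have : (LE.map Prod.snd).Perm m := hmap ▸ hperm.map Prod.snd
        exact ((this.map Prod.fst).nodup_iff).mpr hpre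
      cases dec <;> simpa using hbase
    simp only [hL]
    rw [pvOfListItems _ hkeysnd, pvALoop_notfound _ s 1 0 hnotin]
    have hlen : (if dec then (LE.map Prod.snd).reverse else LE.map Prod.snd).length = m.length := by
      have : LE.length = m.length := by
        rw [hperm.length_eq]
        have := congrArg List.length hmap
        simpa using this
      cases dec <;> simp [this]
    rw [hlen]
    simp only [Prod.mk.injEq]
    exact ⟨by omega, trivial⟩
  | some p =>
    obtain ⟨it, vt⟩ := p
    have htE : (it, (s, vt)) ∈ E := pvFindMotif_some_mem E s it vt hfind
    set t : Int × (String × Int) := (it, (s, vt)) with ht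
    have huniq : ∀ e ∈ LE, e.2.1 = s → e = t :=
      fun e he hes => pvEnumKeyUnique m hpre 0 e t (hperm.mem_iff.mp he) htE (by simp [ht, hes])
    have htLE : t ∈ LE := hperm.mem_iff.mpr htE
    have htb := hbounds t htE
    cases dec with
    | false =>
      have hcount := pvALoop_count (pvW C) LE s t 1 0 hpwLE hndLEw htLE (by simp [ht]) huniq
      have hkeysnd : ((LE.map Prod.snd).map Prod.fst).Nodup := by
        have : (LE.map Prod.snd).Perm m := hmap ▸ hperm.map Prod.snd
        exact ((this.map Prod.fst).nodup_iff).mpr hpre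
      simp only [hL, Bool.false_eq_true, if_false]
      rw [pvOfListItems _ hkeysnd, hcount]
      have hcp : LE.countP (fun e => decide (pvW C e < pvW C t))
          = E.countP (fun p => decide (p.2.2 < vt ∨ (p.2.2 = vt ∧ p.1 < it))) := by
        rw [hperm.countP_eq]
        apply List.countP_congr
        intro x hx
        have hbx := hbounds x hx
        simp only [decide_eq_true_eq]
        rw [pvW, pvW, ht]
        simp only
        rw [pvLex _ _ _ _ _ hbx.1 hbx.2 htb.1 htb.2]
      rw [PySem.List.foldl_ite_add_one (fun p => p.2.2 < vt ∨ (p.2.2 = vt ∧ p.1 < it)) E 1]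
      rw [hcp]
    | true =>
      have hpwR : LE.reverse.Pairwise (fun a b => -(pvW C a) ≤ -(pvW C b)) := by
        rw [List.pairwise_reverse]
        exact hpwLE.imp (by intro a b h; omega)
      have hndR : (LE.reverse.map fun e => -(pvW C e)).Nodup := by
        have h1 : (LE.map fun e => -(pvW C e)).Nodup := by
          have : (LE.map fun e => -(pvW C e)) = (LE.map (pvW C)).map Neg.neg := by
            rw [List.map_map]; rfl
          rw [this]
          exact hndLEw.map neg_injective
        rw [List.map_reverse, List.nodup_reverse]
        exact h1
      have huniqR : ∀ e ∈ LE.reverse, e.2.1 = s → e = t :=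
        fun e he => huniq e (List.mem_reverse.mp he)
      have hcount := pvALoop_count (fun e => -(pvW C e)) LE.reverse s t 1 0 hpwR hndR
        (List.mem_reverse.mpr htLE) (by simp [ht]) huniqR
      have hkeysnd : (((LE.map Prod.snd).reverse).map Prod.fst).Nodup := by
        have hbase : ((LE.map Prod.snd).map Prod.fst).Nodup := by
          have : (LE.map Prod.snd).Perm m := hmap ▸ hperm.map Prod.snd
          exact ((this.map Prod.fst).nodup_iff).mpr hpre
        rw [List.map_reverse, List.nodup_reverse]
        exact hbase
      simp only [hL, if_true]
      rw [pvOfListItems _ hkeysnd, ← List.map_reverse, hcount]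
      have hcp : LE.reverse.countP (fun e => decide (-(pvW C e) < -(pvW C t)))
          = E.countP (fun p => decide (p.2.2 > vt ∨ (p.2.2 = vt ∧ p.1 > it))) := by
        rw [List.countP_reverse, hperm.countP_eq]
        apply List.countP_congr
        intro x hx
        have hbx := hbounds x hx
        simp only [decide_eq_true_eq, gt_iff_lt]
        have : -(pvW C x) < -(pvW C t) ↔ pvW C t < pvW C x := by omega
        rw [this, pvW, pvW, ht]
        simp only
        rw [pvLex _ _ _ _ _ htb.1 htb.2 hbx.1 hbx.2]
        constructor
        · rintro (h | ⟨h1, h2⟩)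
          · exact Or.inl h
          · exact Or.inr ⟨h1.symm, h2⟩
        · rintro (h | ⟨h1, h2⟩)
          · exact Or.inl h
          · exact Or.inr ⟨h1.symm, h2⟩
      rw [PySem.List.foldl_ite_add_one (fun p => p.2.2 > vt ∨ (p.2.2 = vt ∧ p.1 > it)) E 1]
      rw [hcp]
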